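-- pv_equiv track=rewrite | github.com/VictorCurean/xGenome | xgenom/fm_index/first.py | get_first_function
-- ===== SOURCE A (Python) =====
-- def get_first_function(dict):
--     """
--     Function that returns a dictionary corresponding to the FM-Index first column mapping of a character
--     The Function has the characters as keys, and the value is a tuple holding the first occurrence the last occurrence
--     :param dict: the dictionary holding the character count of a string
--     :return: the dictionary holding the intervals at which a character is located in the FIRST column of the FM-index
--     """
--
--     function_dict = {}
--     prev_first_value = 0
--     prev_last_value = 0
--
--     for k, value in dict.items():
--
--         function_dict[k] = (prev_first_value, prev_last_value + value - 1)
--         prev_first_value += value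
--         prev_last_value += value
--
--     return function_dict
-- ===== SOURCE B (Python) =====
-- def get_first_function(dict):
--     """
--     FM-index first-column mapping built BACK-TO-FRONT: walk the items in
--     reverse, subtracting each count from the running total (a suffix sum),
--     emit each interval as (total - count, total - 1), then reverse the
--     collected pairs to restore the original key order.
--     """
--     total = sum(dict.values())
--     rev = []
--     for k, v in reversed(list(dict.items())):
--         rev.append((k, (total - v, total - 1)))
--         total -= v
--     return {k: iv for k, iv in reversed(rev)}
-- ===== Notes on version B (the rewrite author's own statement) =====
-- stated objective: alternative
-- what changed: Instead of A's forward loop with two running prefix counters, B traverses the items back-to-front maintaining a suffix total (initialised to sum(values)), emits each interval as (total-count, total-1) while subtracting, and reverses the collected pairs at the end to restore key order.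
import Mathlib
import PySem

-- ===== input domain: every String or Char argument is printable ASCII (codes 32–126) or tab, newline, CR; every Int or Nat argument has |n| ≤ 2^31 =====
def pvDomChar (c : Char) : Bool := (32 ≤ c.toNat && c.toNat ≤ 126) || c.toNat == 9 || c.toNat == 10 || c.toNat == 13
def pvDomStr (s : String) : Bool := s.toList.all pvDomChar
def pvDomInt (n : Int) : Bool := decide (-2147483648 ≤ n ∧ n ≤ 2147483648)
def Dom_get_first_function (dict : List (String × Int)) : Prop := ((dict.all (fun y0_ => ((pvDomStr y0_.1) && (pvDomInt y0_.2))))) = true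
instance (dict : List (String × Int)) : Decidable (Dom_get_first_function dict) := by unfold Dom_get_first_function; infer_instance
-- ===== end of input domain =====

-- B builds the mapping back-to-front with a suffix total and reverses at the end; same result as A's forward running-sum loop.

-- ===== PORT A =====
-- one loop step: function_dict[k] = (prev_first, prev_last + value - 1); both prev counters advance by value
def pvStepA (st : PySem.Dict String (Int × Int) × Int × Int) (kv : String × Int) :
    PySem.Dict String (Int × Int) × Int × Int :=
  (st.1.insert kv.1 (st.2.1, st.2.2 + kv.2 - 1), st.2.1 + kv.2, st.2.2 + kv.2)

def get_first_function (dict : List (String × Int)) : List (String × Int × Int) :=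
  (dict.foldl pvStepA (PySem.Dict.empty, 0, 0)).1.items

-- ===== PORT B =====
-- Source B's reversed loop: for k, v in reversed(list(dict.items())): rev.append((k,(total-v,total-1))); total -= v
def pvRevPass (items : List (String × Int)) (total : Int) :
    List (String × (Int × Int)) × Int :=
  items.reverse.foldl
    (fun st kv => (st.1 ++ [(kv.1, (st.2 - kv.2, st.2 - 1))], st.2 - kv.2))
    ([], total)

def get_first_function_alt (dict : List (String × Int)) : List (String × Int × Int) :=
  let total := (dict.map (·.2)).sum            -- sum(dict.values())
  let rev := (pvRevPass dict total).1
  -- {k: iv for k, iv in reversed(rev)}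
  (rev.reverse.foldl (fun d t => d.insert t.1 t.2) PySem.Dict.empty).items

-- ===== PRECONDITION & SPEC =====
def Spec_get_first_function (dict : List (String × Int)) (out : List (String × Int × Int)) : Prop := out = get_first_function_alt dict
instance (dict : List (String × Int)) (out : List (String × Int × Int)) : Decidable (Spec_get_first_function dict out) := by unfold Spec_get_first_function; infer_instance

-- ===== CLAIM (what is proved, stated in full; the proofs are below) =====
def Claim_equal_get_first_function : Prop := ∀ (dict : List (String × Int)), Dom_get_first_function dict → Spec_get_first_function dict (get_first_function dict)

-- ===== LEMMAS AND PROOFS =====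

-- forward annotation of items with their prefix-sum interval (proof device only)
def pvAnn (l : List (String × Int)) (s : Int) : List (String × (Int × Int)) :=
  match l with
  | [] => []
  | kv :: rest => (kv.1, (s, s + kv.2 - 1)) :: pvAnn rest (s + kv.2)

-- the backward pass produces exactly the reversed forward annotation starting at t - sum
theorem pvRevPass_eq (l : List (String × Int)) (t : Int) :
    pvRevPass l t = ((pvAnn l (t - (l.map (·.2)).sum)).reverse, t - (l.map (·.2)).sum) := by
  induction l generalizing t with
  | nil => simp [pvRevPass, pvAnn]
  | cons kv rest ih =>
      have h : (kv :: rest).reverse = rest.reverse ++ [kv] := by simp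
      simp only [pvRevPass, h, List.foldl_append, List.foldl_cons, List.foldl_nil]
      have := ih t
      simp only [pvRevPass] at this
      rw [this]
      simp [pvAnn]
      have harg : t - (kv.2 + (List.map (fun x => x.2) rest).sum) + kv.2
          = t - (List.map (fun x => x.2) rest).sum := by ring
      rw [harg]
      exact ⟨⟨rfl, by ring, rfl⟩, by ring⟩

-- A's fold equals inserting the forward annotation in order
theorem pvA_eq (l : List (String × Int)) (d : PySem.Dict String (Int × Int)) (s : Int) :
    (l.foldl pvStepA (d, s, s)).1 =
      (pvAnn l s).foldl (fun d t => d.insert t.1 t.2) d := by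
  induction l generalizing d s with
  | nil => rfl
  | cons kv rest ih =>
      simp only [List.foldl_cons, pvStepA, pvAnn]
      exact ih (d.insert kv.1 (s, s + kv.2 - 1)) (s + kv.2)

-- ===== VERDICT (by name: the statement is the Claim_ definition above) =====
theorem get_first_function_spec : Claim_equal_get_first_function := by
  intro dict _
  show get_first_function dict = get_first_function_alt dict
  unfold get_first_function get_first_function_alt
  rw [pvA_eq dict PySem.Dict.empty 0]
  simp [pvRevPass_eq]
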